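-- pv_equiv track=rewrite | github.com/changwoolab/20252R0136COSE36203 | build_database.py | classify_food_category
-- ===== SOURCE A (Python) =====
-- def classify_food_category(food_name):
--     """Classify food into categories based on name"""
--     name_lower = food_name.lower()
--
--     if any(word in name_lower for word in ['stew', 'soup', 'jjigae', 'tang', 'guk']):
--         return "Soup/Stew"
--     elif any(word in name_lower for word in ['grilled', 'bbq', 'gui']):
--         return "Grilled Meat"
--     elif any(word in name_lower for word in ['kimchi']):
--         return "Kimchi"
--     elif any(word in name_lower for word in ['noodle', 'myeon']):
--         return "Noodles"
--     elif any(word in name_lower for word in ['rice', 'bap', 'porridge', 'juk']):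
--         return "Rice Dish"
--     elif any(word in name_lower for word in ['pancake', 'jeon']):
--         return "Pancake"
--     elif any(word in name_lower for word in ['fried', 'tuigim']):
--         return "Fried Food"
--     elif any(word in name_lower for word in ['seasoned', 'muchim', 'namul']):
--         return "Side Dish (Banchan)"
--     elif any(word in name_lower for word in ['braised', 'jorim']):
--         return "Braised Dish"
--     elif any(word in name_lower for word in ['cake', 'tteok', 'sweet', 'dessert', 'punch', 'drink']):
--         return "Dessert/Beverage"
--     elif any(word in name_lower for word in ['wraps', 'ssam', 'slices']):
--         return "Meat Dish"
--     else:
--         return "Korean Dish"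
-- ===== SOURCE B (Python) =====
-- # Different algorithm: one pass over a flat (keyword, priority) list keeping the
-- # minimum matching priority, then index a category array (default = last slot).
-- _FLAT = [
--     ("stew", 0), ("soup", 0), ("jjigae", 0), ("tang", 0), ("guk", 0),
--     ("grilled", 1), ("bbq", 1), ("gui", 1),
--     ("kimchi", 2),
--     ("noodle", 3), ("myeon", 3),
--     ("rice", 4), ("bap", 4), ("porridge", 4), ("juk", 4),
--     ("pancake", 5), ("jeon", 5),
--     ("fried", 6), ("tuigim", 6),
--     ("seasoned", 7), ("muchim", 7), ("namul", 7),
--     ("braised", 8), ("jorim", 8),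
--     ("cake", 9), ("tteok", 9), ("sweet", 9), ("dessert", 9), ("punch", 9), ("drink", 9),
--     ("wraps", 10), ("ssam", 10), ("slices", 10),
-- ]
-- _CATS = ["Soup/Stew", "Grilled Meat", "Kimchi", "Noodles", "Rice Dish", "Pancake",
--          "Fried Food", "Side Dish (Banchan)", "Braised Dish", "Dessert/Beverage",
--          "Meat Dish", "Korean Dish"]
--
-- def classify_food_category(food_name):
--     """Classify food into categories based on name"""
--     name_lower = food_name.lower()
--     best = 11
--     for keyword, priority in _FLAT:
--         if priority < best and keyword in name_lower:
--             best = priority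
--     return _CATS[best]
-- ===== Notes on version B (the rewrite author's own statement) =====
-- stated objective: alternative
-- what changed: Instead of an ordered elif chain of per-group any() substring tests with early return, B makes a single pass over a flat (keyword, priority) list keeping a running minimum matching priority, and indexes a category array at the end.
import Mathlib
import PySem

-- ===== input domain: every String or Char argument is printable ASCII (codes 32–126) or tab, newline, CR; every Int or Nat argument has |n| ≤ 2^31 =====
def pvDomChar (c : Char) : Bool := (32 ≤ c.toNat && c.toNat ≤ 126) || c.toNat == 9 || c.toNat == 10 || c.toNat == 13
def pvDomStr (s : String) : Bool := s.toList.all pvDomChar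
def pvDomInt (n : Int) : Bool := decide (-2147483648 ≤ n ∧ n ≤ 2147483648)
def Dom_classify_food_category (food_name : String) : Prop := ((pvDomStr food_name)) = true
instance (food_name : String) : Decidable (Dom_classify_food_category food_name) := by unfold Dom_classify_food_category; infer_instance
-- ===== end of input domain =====

-- B replaces the ordered elif chain by one pass over a flat (keyword, priority) list
-- keeping the minimum matching priority, then indexing a category array (objective: alternative).

-- ===== PORT A =====
def classify_food_category (food_name : String) : String :=
  let name_lower := PySem.Str.lower food_name
  if ["stew", "soup", "jjigae", "tang", "guk"].any (fun word => PySem.Str.isIn word name_lower) then "Soup/Stew"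
  else if ["grilled", "bbq", "gui"].any (fun word => PySem.Str.isIn word name_lower) then "Grilled Meat"
  else if ["kimchi"].any (fun word => PySem.Str.isIn word name_lower) then "Kimchi"
  else if ["noodle", "myeon"].any (fun word => PySem.Str.isIn word name_lower) then "Noodles"
  else if ["rice", "bap", "porridge", "juk"].any (fun word => PySem.Str.isIn word name_lower) then "Rice Dish"
  else if ["pancake", "jeon"].any (fun word => PySem.Str.isIn word name_lower) then "Pancake"
  else if ["fried", "tuigim"].any (fun word => PySem.Str.isIn word name_lower) then "Fried Food"
  else if ["seasoned", "muchim", "namul"].any (fun word => PySem.Str.isIn word name_lower) then "Side Dish (Banchan)"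
  else if ["braised", "jorim"].any (fun word => PySem.Str.isIn word name_lower) then "Braised Dish"
  else if ["cake", "tteok", "sweet", "dessert", "punch", "drink"].any (fun word => PySem.Str.isIn word name_lower) then "Dessert/Beverage"
  else if ["wraps", "ssam", "slices"].any (fun word => PySem.Str.isIn word name_lower) then "Meat Dish"
  else "Korean Dish"

-- ===== PORT B =====
def pvFlat : List (String × Nat) :=
  [ ("stew", 0),
    ("soup", 0),
    ("jjigae", 0),
    ("tang", 0),
    ("guk", 0),
    ("grilled", 1),
    ("bbq", 1),
    ("gui", 1),
    ("kimchi", 2),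
    ("noodle", 3),
    ("myeon", 3),
    ("rice", 4),
    ("bap", 4),
    ("porridge", 4),
    ("juk", 4),
    ("pancake", 5),
    ("jeon", 5),
    ("fried", 6),
    ("tuigim", 6),
    ("seasoned", 7),
    ("muchim", 7),
    ("namul", 7),
    ("braised", 8),
    ("jorim", 8),
    ("cake", 9),
    ("tteok", 9),
    ("sweet", 9),
    ("dessert", 9),
    ("punch", 9),
    ("drink", 9),
    ("wraps", 10),
    ("ssam", 10),
    ("slices", 10) ]

def pvCats : List String :=
  ["Soup/Stew", "Grilled Meat", "Kimchi", "Noodles", "Rice Dish", "Pancake", "Fried Food", "Side Dish (Banchan)", "Braised Dish", "Dessert/Beverage", "Meat Dish", "Korean Dish"]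

def classify_food_category_alt (food_name : String) : String :=
  let name_lower := PySem.Str.lower food_name
  let best := pvFlat.foldl
    (fun best p => if p.2 < best ∧ PySem.Str.isIn p.1 name_lower = true then p.2 else best) 11
  pvCats.getD best "Korean Dish"

-- ===== PRECONDITION & SPEC =====
def Spec_classify_food_category (food_name : String) (out : String) : Prop := out = classify_food_category_alt food_name
instance (food_name : String) (out : String) : Decidable (Spec_classify_food_category food_name out) := by unfold Spec_classify_food_category; infer_instance

-- ===== CLAIM (what is proved, stated in full; the proofs are below) =====
def Claim_equal_classify_food_category : Prop := ∀ (food_name : String), Dom_classify_food_category food_name → Spec_classify_food_category food_name (classify_food_category food_name)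

-- ===== LEMMAS AND PROOFS =====

-- ===== VERDICT (by name: the statement is the Claim_ definition above) =====
theorem classify_food_category_spec : Claim_equal_classify_food_category := by
  intro food_name _
  unfold Spec_classify_food_category classify_food_category classify_food_category_alt
  simp only [pvFlat, pvCats]
  generalize PySem.Str.lower food_name = nl
  by_cases h0 : PySem.Str.isIn "stew" nl = true
  · simp at h0; simp [h0]
  simp only [Bool.not_eq_true] at h0
  simp at h0
  by_cases h1 : PySem.Str.isIn "soup" nl = true
  · simp at h1; simp [h0, h1]
  simp only [Bool.not_eq_true] at h1
  simp at h1
  by_cases h2 : PySem.Str.isIn "jjigae" nl = true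
  · simp at h2; simp [h0, h1, h2]
  simp only [Bool.not_eq_true] at h2
  simp at h2
  by_cases h3 : PySem.Str.isIn "tang" nl = true
  · simp at h3; simp [h0, h1, h2, h3]
  simp only [Bool.not_eq_true] at h3
  simp at h3
  by_cases h4 : PySem.Str.isIn "guk" nl = true
  · simp at h4; simp [h0, h1, h2, h3, h4]
  simp only [Bool.not_eq_true] at h4
  simp at h4
  by_cases h5 : PySem.Str.isIn "grilled" nl = true
  · simp at h5; simp [h0, h1, h2, h3, h4, h5]
  simp only [Bool.not_eq_true] at h5
  simp at h5
  by_cases h6 : PySem.Str.isIn "bbq" nl = true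
  · simp at h6; simp [h0, h1, h2, h3, h4, h5, h6]
  simp only [Bool.not_eq_true] at h6
  simp at h6
  by_cases h7 : PySem.Str.isIn "gui" nl = true
  · simp at h7; simp [h0, h1, h2, h3, h4, h5, h6, h7]
  simp only [Bool.not_eq_true] at h7
  simp at h7
  by_cases h8 : PySem.Str.isIn "kimchi" nl = true
  · simp at h8; simp [h0, h1, h2, h3, h4, h5, h6, h7, h8]
  simp only [Bool.not_eq_true] at h8
  simp at h8
  by_cases h9 : PySem.Str.isIn "noodle" nl = true
  · simp at h9; simp [h0, h1, h2, h3, h4, h5, h6, h7, h8, h9]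
  simp only [Bool.not_eq_true] at h9
  simp at h9
  by_cases h10 : PySem.Str.isIn "myeon" nl = true
  · simp at h10; simp [h0, h1, h2, h3, h4, h5, h6, h7, h8, h9, h10]
  simp only [Bool.not_eq_true] at h10
  simp at h10
  by_cases h11 : PySem.Str.isIn "rice" nl = true
  · simp at h11; simp [h0, h1, h2, h3, h4, h5, h6, h7, h8, h9, h10, h11]
  simp only [Bool.not_eq_true] at h11
  simp at h11
  by_cases h12 : PySem.Str.isIn "bap" nl = true
  · simp at h12; simp [h0, h1, h2, h3, h4, h5, h6, h7, h8, h9, h10, h11, h12]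
  simp only [Bool.not_eq_true] at h12
  simp at h12
  by_cases h13 : PySem.Str.isIn "porridge" nl = true
  · simp at h13; simp [h0, h1, h2, h3, h4, h5, h6, h7, h8, h9, h10, h11, h12, h13]
  simp only [Bool.not_eq_true] at h13
  simp at h13
  by_cases h14 : PySem.Str.isIn "juk" nl = true
  · simp at h14; simp [h0, h1, h2, h3, h4, h5, h6, h7, h8, h9, h10, h11, h12, h13, h14]
  simp only [Bool.not_eq_true] at h14
  simp at h14
  by_cases h15 : PySem.Str.isIn "pancake" nl = true
  · simp at h15; simp [h0, h1, h2, h3, h4, h5, h6, h7, h8, h9, h10, h11, h12, h13, h14, h15]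
  simp only [Bool.not_eq_true] at h15
  simp at h15
  by_cases h16 : PySem.Str.isIn "jeon" nl = true
  · simp at h16; simp [h0, h1, h2, h3, h4, h5, h6, h7, h8, h9, h10, h11, h12, h13, h14, h15, h16]
  simp only [Bool.not_eq_true] at h16
  simp at h16
  by_cases h17 : PySem.Str.isIn "fried" nl = true
  · simp at h17; simp [h0, h1, h2, h3, h4, h5, h6, h7, h8, h9, h10, h11, h12, h13, h14, h15, h16, h17]
  simp only [Bool.not_eq_true] at h17
  simp at h17
  by_cases h18 : PySem.Str.isIn "tuigim" nl = true
  · simp at h18; simp [h0, h1, h2, h3, h4, h5, h6, h7, h8, h9, h10, h11, h12, h13, h14, h15, h16, h17, h18]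
  simp only [Bool.not_eq_true] at h18
  simp at h18
  by_cases h19 : PySem.Str.isIn "seasoned" nl = true
  · simp at h19; simp [h0, h1, h2, h3, h4, h5, h6, h7, h8, h9, h10, h11, h12, h13, h14, h15, h16, h17, h18, h19]
  simp only [Bool.not_eq_true] at h19
  simp at h19
  by_cases h20 : PySem.Str.isIn "muchim" nl = true
  · simp at h20; simp [h0, h1, h2, h3, h4, h5, h6, h7, h8, h9, h10, h11, h12, h13, h14, h15, h16, h17, h18, h19, h20]
  simp only [Bool.not_eq_true] at h20
  simp at h20
  by_cases h21 : PySem.Str.isIn "namul" nl = true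
  · simp at h21; simp [h0, h1, h2, h3, h4, h5, h6, h7, h8, h9, h10, h11, h12, h13, h14, h15, h16, h17, h18, h19, h20, h21]
  simp only [Bool.not_eq_true] at h21
  simp at h21
  by_cases h22 : PySem.Str.isIn "braised" nl = true
  · simp at h22; simp [h0, h1, h2, h3, h4, h5, h6, h7, h8, h9, h10, h11, h12, h13, h14, h15, h16, h17, h18, h19, h20, h21, h22]
  simp only [Bool.not_eq_true] at h22
  simp at h22
  by_cases h23 : PySem.Str.isIn "jorim" nl = true
  · simp at h23; simp [h0, h1, h2, h3, h4, h5, h6, h7, h8, h9, h10, h11, h12, h13, h14, h15, h16, h17, h18, h19, h20, h21, h22, h23]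
  simp only [Bool.not_eq_true] at h23
  simp at h23
  by_cases h24 : PySem.Str.isIn "cake" nl = true
  · simp at h24; simp [h0, h1, h2, h3, h4, h5, h6, h7, h8, h9, h10, h11, h12, h13, h14, h15, h16, h17, h18, h19, h20, h21, h22, h23, h24]
  simp only [Bool.not_eq_true] at h24
  simp at h24
  by_cases h25 : PySem.Str.isIn "tteok" nl = true
  · simp at h25; simp [h0, h1, h2, h3, h4, h5, h6, h7, h8, h9, h10, h11, h12, h13, h14, h15, h16, h17, h18, h19, h20, h21, h22, h23, h24, h25]
  simp only [Bool.not_eq_true] at h25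
  simp at h25
  by_cases h26 : PySem.Str.isIn "sweet" nl = true
  · simp at h26; simp [h0, h1, h2, h3, h4, h5, h6, h7, h8, h9, h10, h11, h12, h13, h14, h15, h16, h17, h18, h19, h20, h21, h22, h23, h24, h25, h26]
  simp only [Bool.not_eq_true] at h26
  simp at h26
  by_cases h27 : PySem.Str.isIn "dessert" nl = true
  · simp at h27; simp [h0, h1, h2, h3, h4, h5, h6, h7, h8, h9, h10, h11, h12, h13, h14, h15, h16, h17, h18, h19, h20, h21, h22, h23, h24, h25, h26, h27]
  simp only [Bool.not_eq_true] at h27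
  simp at h27
  by_cases h28 : PySem.Str.isIn "punch" nl = true
  · simp at h28; simp [h0, h1, h2, h3, h4, h5, h6, h7, h8, h9, h10, h11, h12, h13, h14, h15, h16, h17, h18, h19, h20, h21, h22, h23, h24, h25, h26, h27, h28]
  simp only [Bool.not_eq_true] at h28
  simp at h28
  by_cases h29 : PySem.Str.isIn "drink" nl = true
  · simp at h29; simp [h0, h1, h2, h3, h4, h5, h6, h7, h8, h9, h10, h11, h12, h13, h14, h15, h16, h17, h18, h19, h20, h21, h22, h23, h24, h25, h26, h27, h28, h29]
  simp only [Bool.not_eq_true] at h29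
  simp at h29
  by_cases h30 : PySem.Str.isIn "wraps" nl = true
  · simp at h30; simp [h0, h1, h2, h3, h4, h5, h6, h7, h8, h9, h10, h11, h12, h13, h14, h15, h16, h17, h18, h19, h20, h21, h22, h23, h24, h25, h26, h27, h28, h29, h30]
  simp only [Bool.not_eq_true] at h30
  simp at h30
  by_cases h31 : PySem.Str.isIn "ssam" nl = true
  · simp at h31; simp [h0, h1, h2, h3, h4, h5, h6, h7, h8, h9, h10, h11, h12, h13, h14, h15, h16, h17, h18, h19, h20, h21, h22, h23, h24, h25, h26, h27, h28, h29, h30, h31]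
  simp only [Bool.not_eq_true] at h31
  simp at h31
  by_cases h32 : PySem.Str.isIn "slices" nl = true
  · simp at h32; simp [h0, h1, h2, h3, h4, h5, h6, h7, h8, h9, h10, h11, h12, h13, h14, h15, h16, h17, h18, h19, h20, h21, h22, h23, h24, h25, h26, h27, h28, h29, h30, h31, h32]
  simp only [Bool.not_eq_true] at h32
  simp at h32
  simp [h0, h1, h2, h3, h4, h5, h6, h7, h8, h9, h10, h11, h12, h13, h14, h15, h16, h17, h18, h19, h20, h21, h22, h23, h24, h25, h26, h27, h28, h29, h30, h31, h32]
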